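-- pv_equiv track=rewrite | github.com/sofievargas/barrett-fellows | methods.py | triad_8
-- ===== SOURCE A (Python) =====
-- def triad_8 (nodes, edges):
--     #a-> b -> c -> a
--         triads = set() #this set will have triads that were already counted
--         count = 0
--         for node_a in nodes:
--             for node_b in nodes:
--                 if node_b != node_a: #skip if they are the same node
--                     edge_one = (node_a, node_b) #a -> b
--                     inverse_edge_one = (node_b, node_a) #a <- b
--                     if edge_one in edges and inverse_edge_one not in edges:
--                         for node_c in nodes:
--                             if node_c != node_b and node_c != node_a: #if this combo of nodes was not
--                                     edge_two = (node_b, node_c) #b -> c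
--                                     inverse_edge_two = (node_c, node_b) #c <- b
--                                     edge_three = (node_c, node_a)
--                                     inverse_edge_three = (node_a, node_c)
--                                     if edge_three in edges and edge_two in edges and inverse_edge_two not in edges and inverse_edge_three not in edges:
--                                         sorted_nodes = sorted([node_a, node_b, node_c])
--                                         triad = tuple(sorted_nodes)
--                                         if triad not in triads:
--                                             triads.add(triad)
--                                             count+=1
--         return count
-- ===== SOURCE B (Python) =====
-- def triad_8(nodes, edges):
--     # edge-centric: dedupe edges, keep one-way edges between known nodes, then
--     # close each one-way edge pair (a->b, b->c) with the one-way edge c->a.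
--     nset = set(nodes)
--     eset = set(edges)
--     good = {(u, v) for (u, v) in eset
--             if u != v and u in nset and v in nset and (v, u) not in eset}
--     triads = {tuple(sorted((a, b, c)))
--               for (a, b) in good for (b2, c) in good
--               if b2 == b and c != a and (c, a) in good}
--     return len(triads)
-- ===== Notes on version B (the rewrite author's own statement) =====
-- stated objective: faster
-- what changed: Replaces A's triple loop over nodes with repeated linear edge-list membership tests by an edge-centric pass: dedupe edges and nodes into hash sets, keep the one-way edges between known nodes, and close each pair of chained one-way edges (a->b, b->c) with an O(1) set lookup of the one-way edge (c,a), collecting sorted triples in a set.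
import Mathlib
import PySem

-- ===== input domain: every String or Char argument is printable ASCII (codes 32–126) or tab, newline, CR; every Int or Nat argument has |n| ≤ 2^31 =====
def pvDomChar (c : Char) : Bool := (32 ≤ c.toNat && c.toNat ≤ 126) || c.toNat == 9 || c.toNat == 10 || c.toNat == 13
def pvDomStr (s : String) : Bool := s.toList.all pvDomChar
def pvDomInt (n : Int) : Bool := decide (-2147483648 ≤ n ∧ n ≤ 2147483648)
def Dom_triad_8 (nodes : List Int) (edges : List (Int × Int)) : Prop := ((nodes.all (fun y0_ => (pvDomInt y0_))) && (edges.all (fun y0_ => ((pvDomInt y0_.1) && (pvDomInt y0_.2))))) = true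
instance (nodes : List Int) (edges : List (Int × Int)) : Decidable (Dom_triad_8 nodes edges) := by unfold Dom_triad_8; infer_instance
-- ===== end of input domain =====

-- B counts the same 030C triads edge-centrically (deduped one-way edge set closed by a third edge)
-- instead of A's triple loop over nodes; objective: faster on sparse graphs, alternative algorithm.

-- ===== PORT A =====
-- tuple(l) for a 3-element list (sorted([a,b,c]) always has length 3)
def pvTuple3 (l : List Int) : Int × Int × Int :=
  match l with
  | [x, y, z] => (x, y, z)
  | _ => (0, 0, 0)

-- the inner 'for node_c in nodes' loop of A, folding over l (called with l = nodes)
def pvLoopC (edges : List (Int × Int)) (node_a node_b : Int)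
    (st : PySem.Set (Int × Int × Int) × Int) (l : List Int) :
    PySem.Set (Int × Int × Int) × Int :=
  l.foldl (fun st node_c =>
    if node_c ≠ node_b ∧ node_c ≠ node_a then
      let edge_two := (node_b, node_c)
      let inverse_edge_two := (node_c, node_b)
      let edge_three := (node_c, node_a)
      let inverse_edge_three := (node_a, node_c)
      if edge_three ∈ edges ∧ edge_two ∈ edges ∧ inverse_edge_two ∉ edges ∧ inverse_edge_three ∉ edges then
        let triad := pvTuple3 (PySem.List.sorted [node_a, node_b, node_c] (fun x => x) false)
        if triad ∉ st.1 then (PySem.Set.add st.1 triad, st.2 + 1) else st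
      else st
    else st) st

-- the 'for node_b in nodes' loop of A, folding over l (called with l = nodes)
def pvLoopB (nodes : List Int) (edges : List (Int × Int)) (node_a : Int)
    (st : PySem.Set (Int × Int × Int) × Int) (l : List Int) :
    PySem.Set (Int × Int × Int) × Int :=
  l.foldl (fun st node_b =>
    if node_b ≠ node_a then
      let edge_one := (node_a, node_b)
      let inverse_edge_one := (node_b, node_a)
      if edge_one ∈ edges ∧ inverse_edge_one ∉ edges then
        pvLoopC edges node_a node_b st nodes
      else st
    else st) st

def triad_8 (nodes : List Int) (edges : List (Int × Int)) : Int :=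
  (nodes.foldl (fun st node_a => pvLoopB nodes edges node_a st nodes)
    (PySem.Set.empty, 0)).2

-- ===== PORT B =====
-- the list underlying the 'good' set comprehension of B
def pvGood (nodes : List Int) (edges : List (Int × Int)) : PySem.Set (Int × Int) :=
  PySem.Set.ofList ((PySem.Set.ofList edges).filter (fun uv =>
    uv.1 != uv.2 && PySem.Set.contains (PySem.Set.ofList nodes) uv.1 &&
    PySem.Set.contains (PySem.Set.ofList nodes) uv.2 &&
    !(PySem.Set.contains (PySem.Set.ofList edges) (uv.2, uv.1))))

def triad_8_alt (nodes : List Int) (edges : List (Int × Int)) : Int :=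
  let good := pvGood nodes edges
  let triads : PySem.Set (Int × Int × Int) := PySem.Set.ofList
    (good.flatMap (fun ab =>
      (good.filter (fun bc =>
        bc.1 == ab.2 && bc.2 != ab.1 && PySem.Set.contains good (bc.2, ab.1))).map
      (fun bc => pvTuple3 (PySem.List.sorted [ab.1, ab.2, bc.2] (fun x => x) false))))
  (triads.length : Int)

-- ===== PRECONDITION & SPEC =====
def Spec_triad_8 (nodes : List Int) (edges : List (Int × Int)) (out : Int) : Prop := out = triad_8_alt nodes edges
instance (nodes : List Int) (edges : List (Int × Int)) (out : Int) : Decidable (Spec_triad_8 nodes edges out) := by unfold Spec_triad_8; infer_instance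

-- ===== CLAIM (what is proved, stated in full; the proofs are below) =====
def Claim_equal_triad_8 : Prop := ∀ (nodes : List Int) (edges : List (Int × Int)), Dom_triad_8 nodes edges → Spec_triad_8 nodes edges (triad_8 nodes edges)

-- ===== LEMMAS AND PROOFS =====

-- the triad predicate both programs realise
def pvT (nodes : List Int) (edges : List (Int × Int)) (t : Int × Int × Int) : Prop :=
  ∃ a b c, a ∈ nodes ∧ b ∈ nodes ∧ c ∈ nodes ∧ b ≠ a ∧ c ≠ b ∧ c ≠ a ∧
    (a, b) ∈ edges ∧ (b, a) ∉ edges ∧ (b, c) ∈ edges ∧ (c, b) ∉ edges ∧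
    (c, a) ∈ edges ∧ (a, c) ∉ edges ∧
    t = pvTuple3 (PySem.List.sorted [a, b, c] (fun x => x) false)

def pvInv (st : PySem.Set (Int × Int × Int) × Int) : Prop :=
  st.1.Nodup ∧ st.2 = (st.1.length : Int)

lemma pvLoopC_cons (edges : List (Int × Int)) (a b : Int)
    (st : PySem.Set (Int × Int × Int) × Int) (c : Int) (l : List Int) :
    pvLoopC edges a b st (c :: l) =
    pvLoopC edges a b
      (if c ≠ b ∧ c ≠ a then
         if (c, a) ∈ edges ∧ (b, c) ∈ edges ∧ (c, b) ∉ edges ∧ (a, c) ∉ edges then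
           if pvTuple3 (PySem.List.sorted [a, b, c] (fun x => x) false) ∉ st.1 then
             (PySem.Set.add st.1 (pvTuple3 (PySem.List.sorted [a, b, c] (fun x => x) false)), st.2 + 1)
           else st
         else st
       else st) l := rfl

lemma pvLoopB_cons (nodes : List Int) (edges : List (Int × Int)) (a : Int)
    (st : PySem.Set (Int × Int × Int) × Int) (b : Int) (l : List Int) :
    pvLoopB nodes edges a st (b :: l) =
    pvLoopB nodes edges a
      (if b ≠ a then
         if (a, b) ∈ edges ∧ (b, a) ∉ edges then pvLoopC edges a b st nodes else st
       else st) l := rfl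

lemma pvLoopC_spec (edges : List (Int × Int)) (a b : Int) (l : List Int)
    (st : PySem.Set (Int × Int × Int) × Int) (h : pvInv st) :
    pvInv (pvLoopC edges a b st l) ∧
    (∀ t, t ∈ (pvLoopC edges a b st l).1 ↔ t ∈ st.1 ∨
      ∃ c ∈ l, c ≠ b ∧ c ≠ a ∧ (c, a) ∈ edges ∧ (b, c) ∈ edges ∧ (c, b) ∉ edges ∧
        (a, c) ∉ edges ∧ t = pvTuple3 (PySem.List.sorted [a, b, c] (fun x => x) false)) := by
  induction l generalizing st with
  | nil => simpa [pvLoopC] using h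
  | cons c l ih =>
    rw [pvLoopC_cons]
    by_cases h1 : c ≠ b ∧ c ≠ a
    · rw [if_pos h1]
      by_cases h2 : (c, a) ∈ edges ∧ (b, c) ∈ edges ∧ (c, b) ∉ edges ∧ (a, c) ∉ edges
      · rw [if_pos h2]
        by_cases h3 : pvTuple3 (PySem.List.sorted [a, b, c] (fun x => x) false) ∈ st.1
        · rw [if_neg (not_not_intro h3)]
          obtain ⟨hinv, hmem⟩ := ih st h
          refine ⟨hinv, fun t => ?_⟩
          rw [hmem t]
          constructor
          · rintro (ht | ⟨c', hc', hrest⟩)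
            · tauto
            · exact Or.inr ⟨c', List.mem_cons_of_mem _ hc', hrest⟩
          · rintro (ht | ⟨c', hc', hrest⟩); · tauto
            rcases List.mem_cons.1 hc' with rfl | hc'
            · exact Or.inl (by rw [hrest.2.2.2.2.2.2]; exact h3)
            · exact Or.inr ⟨c', hc', hrest⟩
        · rw [if_pos h3]
          have hinv' : pvInv (PySem.Set.add st.1
              (pvTuple3 (PySem.List.sorted [a, b, c] (fun x => x) false)), st.2 + 1) := by
            refine ⟨PySem.Set.nodup_add _ _ h.1, ?_⟩
            simp [PySem.Set.add_of_not_mem h3, h.2]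
          obtain ⟨hinv, hmem⟩ := ih _ hinv'
          refine ⟨hinv, fun t => ?_⟩
          rw [hmem t]
          simp only [PySem.Set.mem_add]
          constructor
          · rintro ((ht | rfl) | ⟨c', hc', hrest⟩)
            · tauto
            · exact Or.inr ⟨c, List.mem_cons_self, h1.1, h1.2, h2.1, h2.2.1, h2.2.2.1,
                h2.2.2.2, rfl⟩
            · exact Or.inr ⟨c', List.mem_cons_of_mem _ hc', hrest⟩
          · rintro (ht | ⟨c', hc', hrest⟩); · tauto
            rcases List.mem_cons.1 hc' with rfl | hc'
            · exact Or.inl (Or.inr hrest.2.2.2.2.2.2)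
            · exact Or.inr ⟨c', hc', hrest⟩
      · rw [if_neg h2]
        obtain ⟨hinv, hmem⟩ := ih st h
        refine ⟨hinv, fun t => ?_⟩
        rw [hmem t]
        constructor
        · rintro (ht | ⟨c', hc', hrest⟩); · tauto
          · exact Or.inr ⟨c', List.mem_cons_of_mem _ hc', hrest⟩
        · rintro (ht | ⟨c', hc', hrest⟩); · tauto
          rcases List.mem_cons.1 hc' with rfl | hc'
          · exact absurd ⟨hrest.2.2.1, hrest.2.2.2.1, hrest.2.2.2.2.1, hrest.2.2.2.2.2.1⟩ h2
          · exact Or.inr ⟨c', hc', hrest⟩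
    · rw [if_neg h1]
      obtain ⟨hinv, hmem⟩ := ih st h
      refine ⟨hinv, fun t => ?_⟩
      rw [hmem t]
      constructor
      · rintro (ht | ⟨c', hc', hrest⟩); · tauto
        · exact Or.inr ⟨c', List.mem_cons_of_mem _ hc', hrest⟩
      · rintro (ht | ⟨c', hc', hrest⟩); · tauto
        rcases List.mem_cons.1 hc' with rfl | hc'
        · exact absurd ⟨hrest.1, hrest.2.1⟩ h1
        · exact Or.inr ⟨c', hc', hrest⟩

lemma pvLoopB_spec (nodes : List Int) (edges : List (Int × Int)) (a : Int) (l : List Int)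
    (st : PySem.Set (Int × Int × Int) × Int) (h : pvInv st) :
    pvInv (pvLoopB nodes edges a st l) ∧
    (∀ t, t ∈ (pvLoopB nodes edges a st l).1 ↔ t ∈ st.1 ∨
      ∃ b ∈ l, b ≠ a ∧ (a, b) ∈ edges ∧ (b, a) ∉ edges ∧
        ∃ c ∈ nodes, c ≠ b ∧ c ≠ a ∧ (c, a) ∈ edges ∧ (b, c) ∈ edges ∧ (c, b) ∉ edges ∧
          (a, c) ∉ edges ∧ t = pvTuple3 (PySem.List.sorted [a, b, c] (fun x => x) false)) := by
  induction l generalizing st with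
  | nil => simpa [pvLoopB] using h
  | cons b l ih =>
    rw [pvLoopB_cons]
    by_cases h1 : b ≠ a
    · rw [if_pos h1]
      by_cases h2 : (a, b) ∈ edges ∧ (b, a) ∉ edges
      · rw [if_pos h2]
        obtain ⟨hCinv, hCmem⟩ := pvLoopC_spec edges a b nodes st h
        obtain ⟨hinv, hmem⟩ := ih _ hCinv
        refine ⟨hinv, fun t => ?_⟩
        rw [hmem t]
        constructor
        · rintro (ht | ⟨b', hb', hrest⟩)
          · rw [hCmem t] at ht
            rcases ht with ht | ⟨c, hc, hrest⟩; · tauto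
            exact Or.inr ⟨b, List.mem_cons_self, h1, h2.1, h2.2, c, hc, hrest⟩
          · exact Or.inr ⟨b', List.mem_cons_of_mem _ hb', hrest⟩
        · rintro (ht | ⟨b', hb', hrest⟩)
          · exact Or.inl ((hCmem t).2 (Or.inl ht))
          · rcases List.mem_cons.1 hb' with rfl | hb'
            · exact Or.inl ((hCmem t).2 (Or.inr hrest.2.2.2))
            · exact Or.inr ⟨b', hb', hrest⟩
      · rw [if_neg h2]
        obtain ⟨hinv, hmem⟩ := ih st h
        refine ⟨hinv, fun t => ?_⟩
        rw [hmem t]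
        constructor
        · rintro (ht | ⟨b', hb', hrest⟩); · tauto
          · exact Or.inr ⟨b', List.mem_cons_of_mem _ hb', hrest⟩
        · rintro (ht | ⟨b', hb', hrest⟩); · tauto
          rcases List.mem_cons.1 hb' with rfl | hb'
          · exact absurd ⟨hrest.2.1, hrest.2.2.1⟩ h2
          · exact Or.inr ⟨b', hb', hrest⟩
    · rw [if_neg h1]
      obtain ⟨hinv, hmem⟩ := ih st h
      refine ⟨hinv, fun t => ?_⟩
      rw [hmem t]
      constructor
      · rintro (ht | ⟨b', hb', hrest⟩); · tauto
        · exact Or.inr ⟨b', List.mem_cons_of_mem _ hb', hrest⟩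
      · rintro (ht | ⟨b', hb', hrest⟩); · tauto
        rcases List.mem_cons.1 hb' with rfl | hb'
        · exact absurd hrest.1 h1
        · exact Or.inr ⟨b', hb', hrest⟩

lemma pvLoopA_spec (nodes : List Int) (edges : List (Int × Int)) (l : List Int)
    (st : PySem.Set (Int × Int × Int) × Int) (h : pvInv st) :
    pvInv (l.foldl (fun st node_a => pvLoopB nodes edges node_a st nodes) st) ∧
    (∀ t, t ∈ (l.foldl (fun st node_a => pvLoopB nodes edges node_a st nodes) st).1 ↔
      t ∈ st.1 ∨ ∃ a ∈ l,
        ∃ b ∈ nodes, b ≠ a ∧ (a, b) ∈ edges ∧ (b, a) ∉ edges ∧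
          ∃ c ∈ nodes, c ≠ b ∧ c ≠ a ∧ (c, a) ∈ edges ∧ (b, c) ∈ edges ∧ (c, b) ∉ edges ∧
            (a, c) ∉ edges ∧ t = pvTuple3 (PySem.List.sorted [a, b, c] (fun x => x) false)) := by
  induction l generalizing st with
  | nil => simpa using h
  | cons a l ih =>
    simp only [List.foldl_cons]
    obtain ⟨hBinv, hBmem⟩ := pvLoopB_spec nodes edges a nodes st h
    have := ih _ hBinv
    refine ⟨this.1, fun t => ?_⟩
    rw [this.2 t]
    constructor
    · rintro (ht | ⟨a', ha', hrest⟩)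
      · rw [hBmem t] at ht
        rcases ht with ht | ⟨b, hb, hrest⟩; · tauto
        exact Or.inr ⟨a, List.mem_cons_self, b, hb, hrest⟩
      · exact Or.inr ⟨a', List.mem_cons_of_mem _ ha', hrest⟩
    · rintro (ht | ⟨a', ha', hrest⟩)
      · exact Or.inl ((hBmem t).2 (Or.inl ht))
      · rcases List.mem_cons.1 ha' with rfl | ha'
        · exact Or.inl ((hBmem t).2 (Or.inr hrest))
        · exact Or.inr ⟨a', ha', hrest⟩

-- A's result characterised: some Nodup list realising pvT, returned as its length
lemma triad_8_char (nodes : List Int) (edges : List (Int × Int)) :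
    ∃ S : List (Int × Int × Int), triad_8 nodes edges = (S.length : Int) ∧ S.Nodup ∧
      ∀ t, t ∈ S ↔ pvT nodes edges t := by
  obtain ⟨hinv, hmem⟩ := pvLoopA_spec nodes edges nodes (PySem.Set.empty, 0)
    ⟨List.nodup_nil, rfl⟩
  refine ⟨_, hinv.2, hinv.1, fun t => ?_⟩
  rw [hmem t]
  unfold pvT
  constructor
  · rintro (h | ⟨a, ha, b, hb, h1, h2, h3, c, hc, h4, h5, h6, h7, h8, h9, h10⟩)
    · simp [PySem.Set.empty] at h
    · exact ⟨a, b, c, ha, hb, hc, h1, h4, h5, h2, h3, h7, h8, h6, h9, h10⟩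
  · rintro ⟨a, b, c, ha, hb, hc, h1, h4, h5, h2, h3, h7, h8, h6, h9, h10⟩
    exact Or.inr ⟨a, ha, b, hb, h1, h2, h3, c, hc, h4, h5, h6, h7, h8, h9, h10⟩

-- B's result characterised the same way
lemma mem_pvGood (nodes : List Int) (edges : List (Int × Int)) (u v : Int) :
    (u, v) ∈ pvGood nodes edges ↔
      (u, v) ∈ edges ∧ u ≠ v ∧ u ∈ nodes ∧ v ∈ nodes ∧ (v, u) ∉ edges := by
  unfold pvGood
  rw [PySem.Set.mem_ofList, List.mem_filter]
  simp only [PySem.Set.mem_ofList]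
  simp only [Bool.and_eq_true, bne_iff_ne, ne_eq, Bool.not_eq_true',
    ← Bool.not_eq_true, PySem.Set.contains_iff, PySem.Set.mem_ofList]
  tauto

lemma triad_8_alt_char (nodes : List Int) (edges : List (Int × Int)) :
    ∃ S : List (Int × Int × Int), triad_8_alt nodes edges = (S.length : Int) ∧ S.Nodup ∧
      ∀ t, t ∈ S ↔ pvT nodes edges t := by
  refine ⟨_, rfl, PySem.Set.nodup_ofList _, fun t => ?_⟩
  rw [PySem.Set.mem_ofList]
  simp only [List.mem_flatMap, List.mem_map, List.mem_filter,
    Bool.and_eq_true, beq_iff_eq, bne_iff_ne, ne_eq, PySem.Set.contains_iff]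
  unfold pvT
  constructor
  · rintro ⟨⟨a, b0⟩, hab, ⟨b, c⟩, ⟨hbc, ⟨hb', hne⟩, hga⟩, rfl⟩
    obtain rfl : b = b0 := hb'
    replace hne : c ≠ a := hne
    rw [mem_pvGood] at hab hbc hga
    exact ⟨a, b, c, hab.2.2.1, hab.2.2.2.1, hbc.2.2.2.1, Ne.symm hab.2.1, Ne.symm hbc.2.1,
      hne, hab.1, hab.2.2.2.2, hbc.1, hbc.2.2.2.2, hga.1, hga.2.2.2.2, rfl⟩
  · rintro ⟨a, b, c, ha, hb, hc, hba, hcb, hca, e1, e2, e3, e4, e5, e6, rfl⟩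
    exact ⟨(a, b), (mem_pvGood _ _ _ _).2 ⟨e1, Ne.symm hba, ha, hb, e2⟩,
      (b, c), ⟨(mem_pvGood _ _ _ _).2 ⟨e3, Ne.symm hcb, hb, hc, e4⟩, ⟨rfl, hca⟩,
        (mem_pvGood _ _ _ _).2 ⟨e5, hca, hc, ha, e6⟩⟩, rfl⟩

-- ===== VERDICT (by name: the statement is the Claim_ definition above) =====
theorem triad_8_spec : Claim_equal_triad_8 := by
  intro nodes edges _
  unfold Spec_triad_8
  obtain ⟨SA, hA, hAnd, hAmem⟩ := triad_8_char nodes edges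
  obtain ⟨SB, hB, hBnd, hBmem⟩ := triad_8_alt_char nodes edges
  rw [hA, hB]
  have : SA.Perm SB := (List.perm_ext_iff_of_nodup hAnd hBnd).2
    (fun t => (hAmem t).trans (hBmem t).symm)
  exact_mod_cast this.length_eq
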